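-- pv_equiv track=rewrite | github.com/chrislam82/COMP9021 | Quizzes-git/Quiz_2/quiz_2_test_code.py | uniquely_produced_by_rule
-- ===== SOURCE A (Python) =====
-- def rule_encoded_by(rule_nb):
--     '''
--     "rule_nb" is supposed to be an integer between 0 and 15.
--     '''
--     values = [int(d) for d in f'{rule_nb:04b}'] #rule number converted into bin with 4 digit. So, stores as int in list for each digit in binary
--     return {(p // 2, p % 2): values[p] for p in range(4)}
--
-- def uniquely_produced_by_rule(line): # All inputs are str
--     '''
--     "line" is assumed to be a string consisting of nothing but 0's and 1's.
--
--     Returns an integer n between 0 and 15 if the rule encoded by n is the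
--     UNIQUE rule that can produce "line"; otherwise, returns -1.
--     '''
--
--     # REPLACE pass ABOVE WITH YOUR CODE
--
--     # So lazy way is to generate a list of possible rules, access rules then pop if not a valid rule
--
--     if len(line) < 6: # Need at minimum the initial 2 digits + 4 digits to get 4 different keys
--         return -1 # also to prevent any index errors
--
--     line_dictionary = {} # Empty dictionary (we fill in as we go)
--     for i in range(len(line) - 2): # To account for edges
--         first, second, third = int(line[i]), int(line[i+1]), int(line[i+2])
--         if (first, second) in line_dictionary.keys(): # checking if key is in existing dictionary
--             if line_dictionary[(first, second)] != third:
--                 return -1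
--         line_dictionary[(first,second)] = third # if it isn't, then we store key value pair
--     if len(line_dictionary.keys()) != 4: # dictionary is incomplete; does not have 4 keys hence it is not unique
--         return -1 # don't think you actually need this. if dictionary is incomplete, it will still return false
--         # The alternative is just to return -1 after the last for loop, because if result is not in rules, then it will run that last line
--     for i in range(16): # now comparing dictionaries
--         if line_dictionary == rule_encoded_by(i):
--             return i
-- ===== SOURCE B (Python) =====
-- def uniquely_produced_by_rule(line):
--     if len(line) < 6:
--         return -1
--     candidates = list(range(16))
--     for a, b, c in zip(line, line[1:], line[2:]):
--         f, s, t = int(a), int(b), int(c)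
--         candidates = [n for n in candidates if (n >> (3 - 2 * f - s)) & 1 == t]
--     return candidates[0] if len(candidates) == 1 else -1
-- ===== Notes on version B (the rewrite author's own statement) =====
-- stated objective: simpler
-- what changed: A builds the full context->bit transition dict and then compares it against all 16 rule dicts; B instead progressively filters the set of 16 candidate rule numbers over the sliding 3-windows and returns the unique survivor, so the dict and the 16-dict comparison loop disappear.
-- outside the precondition, e.g. on uniquely_produced_by_rule('020202'): A returns -1, B raises ValueError; on uniquely_produced_by_rule('001122'): A returns None, B returns -1
import Mathlib
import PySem

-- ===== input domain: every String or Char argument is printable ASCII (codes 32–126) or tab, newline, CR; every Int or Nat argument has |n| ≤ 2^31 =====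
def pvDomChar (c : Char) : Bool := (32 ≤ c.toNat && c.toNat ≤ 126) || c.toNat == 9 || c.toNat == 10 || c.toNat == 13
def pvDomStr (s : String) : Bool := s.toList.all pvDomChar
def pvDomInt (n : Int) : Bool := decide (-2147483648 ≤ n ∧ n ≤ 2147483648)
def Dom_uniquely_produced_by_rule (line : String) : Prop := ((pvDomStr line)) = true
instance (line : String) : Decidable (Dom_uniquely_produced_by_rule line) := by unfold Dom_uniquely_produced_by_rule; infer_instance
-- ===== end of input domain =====

-- B replaces A's "build the full transition dict, then compare it against all 16 rule dicts" by a
-- single progressive filter of the 16 candidate rule numbers over the sliding windows (simpler,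
-- same asymptotic cost; return value only, neither version mutates its argument).

-- ===== PORT A =====

-- int(line[i]) on a single character; exact wherever Python's int() returns a value
-- (under Pre_ only '0'/'1' reaches it, where ofChars? is always `some`)
def pvIntChar (c : Char) : Int := (PySem.Int.ofChars? [c]).getD 0

-- the windows (line[i], line[i+1], line[i+2]) for i in range(len(line) - 2), in order
def pvWindows3 : List Char → List (Char × Char × Char)
  | a :: rest@(b :: c :: _) => (a, b, c) :: pvWindows3 rest
  | _ => []

-- rule_encoded_by: digits of f'{rule_nb:04b}', then {(p // 2, p % 2): values[p] for p in range(4)}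
def pvRuleEncoded (rule_nb : Int) : PySem.Dict (Int × Int) Int :=
  let values : List Int :=
    (PySem.Chars.zfill (PySem.Int.toBinChars rule_nb) 4).map (fun d => (PySem.Int.ofChars? [d]).getD 0)
  (PySem.List.pyRange 0 4 1).foldl
    (fun acc p => acc.insert (PySem.Int.floordiv p 2, PySem.Int.mod p 2) (PySem.List.pyGetD values p 0))
    PySem.Dict.empty

-- Python's `==` on dicts: equal key sets with equal values (insertion order ignored)
def pvDictEqPy (d e : PySem.Dict (Int × Int) Int) : Bool :=
  d.keys.length == e.keys.length && d.keys.all (fun k => d.get? k == e.get? k)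

-- the for-loop that builds line_dictionary; none = the early `return -1` on a conflict
def pvAScan : List (Char × Char × Char) → PySem.Dict (Int × Int) Int →
    Option (PySem.Dict (Int × Int) Int)
  | [], d => some d
  | (a, b, c) :: rest, d =>
    let f := pvIntChar a
    let s := pvIntChar b
    let t := pvIntChar c
    if d.contains (f, s) && !(d.getD (f, s) 0 == t) then none
    else pvAScan rest (d.insert (f, s) t)

-- for i in range(16): if line_dictionary == rule_encoded_by(i): return i
-- (falling off the loop is Python's implicit `return None`, excluded by Pre_; -1 is arbitrary)
def pvAFind : List Int → PySem.Dict (Int × Int) Int → Int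
  | [], _ => -1
  | i :: rest, d => if pvDictEqPy d (pvRuleEncoded i) then i else pvAFind rest d

-- A's tail after the scan: the len(keys) != 4 check, then the comparison loop
def pvAFin (d : PySem.Dict (Int × Int) Int) : Int :=
  if !(d.keys.length == 4) then -1 else pvAFind (PySem.List.pyRange 0 16 1) d

def uniquely_produced_by_rule (line : String) : Int :=
  if PySem.Str.len line < 6 then -1
  else
    match pvAScan (pvWindows3 line.toList) PySem.Dict.empty with
    | none => -1
    | some d => pvAFin d

-- ===== PORT B =====

-- (n >> (3 - 2*f - s)) & 1 — exact for f, s ∈ {0, 1}, which is all Pre_ admits here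
-- (Python raises on a negative shift count, which .toNat clamps; outside Pre_ only)
def pvRuleBit (n f s : Int) : Int := PySem.Int.band (n >>> (3 - 2 * f - s).toNat) 1

-- one loop iteration: keep the candidates whose output bit for context (f, s) is t
def pvBStep (cands : List Int) (w : Char × Char × Char) : List Int :=
  let f := pvIntChar w.1
  let s := pvIntChar w.2.1
  let t := pvIntChar w.2.2
  cands.filter (fun n => pvRuleBit n f s == t)

-- candidates[0] if len(candidates) == 1 else -1
def pvBFin (l : List Int) : Int :=
  match l with
  | [n] => n
  | _ => -1

def uniquely_produced_by_rule_alt (line : String) : Int :=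
  if PySem.Str.len line < 6 then -1
  else pvBFin ((pvWindows3 line.toList).foldl pvBStep (PySem.List.pyRange 0 16 1))

-- ===== PRECONDITION & SPEC =====
-- Pre_ is the function's stated domain ("a string consisting of nothing but 0's and 1's",
-- A's docstring) plus the short lines A dismisses before reading any character: outside it
-- A raises ValueError on non-digit characters, and on all-digit lines with a digit ≥ 2 it
-- either returns -1 where B raises on a negative shift count, or falls off its final loop
-- returning None, which is not an Int.
def Pre_uniquely_produced_by_rule (line : String) : Prop :=
  PySem.Str.len line < 6 ∨ ∀ c ∈ line.toList, c = '0' ∨ c = '1'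
instance (line : String) : Decidable (Pre_uniquely_produced_by_rule line) := by
  unfold Pre_uniquely_produced_by_rule; infer_instance

def pvWitness_uniquely_produced_by_rule : String := "01"

def Spec_uniquely_produced_by_rule (line : String) (out : Int) : Prop :=
  out = uniquely_produced_by_rule_alt line
instance (line : String) (out : Int) : Decidable (Spec_uniquely_produced_by_rule line out) := by
  unfold Spec_uniquely_produced_by_rule; infer_instance

-- ===== CLAIM (what is proved, stated in full; the proofs are below) =====
def Claim_equal_uniquely_produced_by_rule : Prop :=
  ∀ (line : String), Dom_uniquely_produced_by_rule line →
    Pre_uniquely_produced_by_rule line →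
    Spec_uniquely_produced_by_rule line (uniquely_produced_by_rule line)

-- ===== LEMMAS AND PROOFS =====

-- The four possible contexts, in rule_encoded_by's insertion order
def pvK4 : List (Int × Int) := [(0, 0), (0, 1), (1, 0), (1, 1)]

-- abstraction of A's dict: its lookups at the four contexts
def pvAbs (d : PySem.Dict (Int × Int) Int) :
    Option Int × Option Int × Option Int × Option Int :=
  (d.get? (0, 0), d.get? (0, 1), d.get? (1, 0), d.get? (1, 1))

def pvLookQ (q : Option Int × Option Int × Option Int × Option Int) (k : Int × Int) :
    Option Int :=
  if k = (0, 0) then q.1 else if k = (0, 1) then q.2.1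
  else if k = (1, 0) then q.2.2.1 else q.2.2.2

def pvCq (n f s : Int) (o : Option Int) : Bool :=
  match o with
  | none => true
  | some v => pvRuleBit n f s == v

def pvConsQ (n : Int) (q : Option Int × Option Int × Option Int × Option Int) : Bool :=
  pvCq n 0 0 q.1 && pvCq n 0 1 q.2.1 && pvCq n 1 0 q.2.2.1 && pvCq n 1 1 q.2.2.2

-- the candidate rules consistent with the information recorded in q
def pvC (q : Option Int × Option Int × Option Int × Option Int) : List Int :=
  (PySem.List.pyRange 0 16 1).filter (fun n => pvConsQ n q)

def pvQok (q : Option Int × Option Int × Option Int × Option Int) : Prop :=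
  (q.1 = none ∨ q.1 = some 0 ∨ q.1 = some 1) ∧
  (q.2.1 = none ∨ q.2.1 = some 0 ∨ q.2.1 = some 1) ∧
  (q.2.2.1 = none ∨ q.2.2.1 = some 0 ∨ q.2.2.1 = some 1) ∧
  (q.2.2.2 = none ∨ q.2.2.2 = some 0 ∨ q.2.2.2 = some 1)

def pvUpd (q : Option Int × Option Int × Option Int × Option Int) (f s t : Int) :
    Option Int × Option Int × Option Int × Option Int :=
  if f = 0 ∧ s = 0 then (some t, q.2.1, q.2.2.1, q.2.2.2)
  else if f = 0 ∧ s = 1 then (q.1, some t, q.2.2.1, q.2.2.2)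
  else if f = 1 ∧ s = 0 then (q.1, q.2.1, some t, q.2.2.2)
  else (q.1, q.2.1, q.2.2.1, some t)

-- q-level mirror of A's tail
def pvDictEqQ (q : Option Int × Option Int × Option Int × Option Int) (i : Int) : Bool :=
  (4 == (pvRuleEncoded i).keys.length) &&
    pvK4.all (fun k => pvLookQ q k == (pvRuleEncoded i).get? k)

def pvAFindQ : List Int → (Option Int × Option Int × Option Int × Option Int) → Int
  | [], _ => -1
  | i :: rest, q => if pvDictEqQ q i then i else pvAFindQ rest q

def pvAQ (q : Option Int × Option Int × Option Int × Option Int) : Int :=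
  if !((pvK4.filter (fun k => (pvLookQ q k).isSome)).length == 4) then -1
  else pvAFindQ (PySem.List.pyRange 0 16 1) q

lemma pvLookQ_abs (d : PySem.Dict (Int × Int) Int) (k : Int × Int) (hk : k ∈ pvK4) :
    pvLookQ (pvAbs d) k = d.get? k := by
  simp only [pvK4, List.mem_cons, List.not_mem_nil, or_false] at hk
  rcases hk with rfl | rfl | rfl | rfl <;> rfl

lemma pvKeys_perm (d : PySem.Dict (Int × Int) Int) (hnd : d.keys.Nodup)
    (hsub : ∀ k ∈ d.keys, k ∈ pvK4) :
    d.keys.Perm (pvK4.filter (fun k => (pvLookQ (pvAbs d) k).isSome)) := by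
  apply (List.perm_ext_iff_of_nodup hnd ((by decide : pvK4.Nodup).filter _)).mpr
  intro k
  constructor
  · intro hk
    refine List.mem_filter.mpr ⟨hsub k hk, ?_⟩
    rw [pvLookQ_abs d k (hsub k hk)]
    have hc := (PySem.Dict.contains_iff_mem_keys (d := d) (k := k)).mpr hk
    rw [PySem.Dict.contains_eq_isSome_get?] at hc
    exact hc
  · intro hk
    obtain ⟨hk4, hs⟩ := List.mem_filter.mp hk
    rw [pvLookQ_abs d k hk4] at hs
    apply (PySem.Dict.contains_iff_mem_keys (d := d) (k := k)).mp
    rw [PySem.Dict.contains_eq_isSome_get?]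
    exact hs

lemma pvDictEq_bridge (d : PySem.Dict (Int × Int) Int)
    (hperm : d.keys.Perm pvK4) (i : Int) :
    pvDictEqPy d (pvRuleEncoded i) = pvDictEqQ (pvAbs d) i := by
  unfold pvDictEqPy pvDictEqQ
  have hlen : d.keys.length = 4 := by rw [hperm.length_eq]; rfl
  rw [hlen, hperm.all_eq]
  simp only [pvK4, List.all_cons, List.all_nil]
  rw [pvLookQ_abs d (0, 0) (by decide), pvLookQ_abs d (0, 1) (by decide),
    pvLookQ_abs d (1, 0) (by decide), pvLookQ_abs d (1, 1) (by decide)]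

lemma pvAFind_bridge (d : PySem.Dict (Int × Int) Int)
    (hperm : d.keys.Perm pvK4) (l : List Int) :
    pvAFind l d = pvAFindQ l (pvAbs d) := by
  induction l with
  | nil => rfl
  | cons i rest ih =>
    simp only [pvAFind, pvAFindQ, pvDictEq_bridge d hperm i, ih]

lemma pvAFin_bridge (d : PySem.Dict (Int × Int) Int) (hnd : d.keys.Nodup)
    (hsub : ∀ k ∈ d.keys, k ∈ pvK4) :
    pvAFin d = pvAQ (pvAbs d) := by
  have hperm := pvKeys_perm d hnd hsub
  unfold pvAFin pvAQ
  rw [hperm.length_eq]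
  by_cases h4 : (pvK4.filter (fun k => (pvLookQ (pvAbs d) k).isSome)).length = 4
  · have hfs : (pvK4.filter (fun k => (pvLookQ (pvAbs d) k).isSome)) = pvK4 :=
      List.Sublist.eq_of_length List.filter_sublist (by rw [h4]; rfl)
    have hpk : d.keys.Perm pvK4 := by rw [← hfs]; exact hperm
    simp only [h4, beq_self_eq_true, Bool.not_true, Bool.false_eq_true, if_false]
    exact pvAFind_bridge d hpk _
  · simp [h4]

set_option maxHeartbeats 4000000 in
lemma pvQfinal (q : Option Int × Option Int × Option Int × Option Int) (hq : pvQok q) :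
    pvAQ q = pvBFin (pvC q) := by
  obtain ⟨q1, q2, q3, q4⟩ := q
  obtain ⟨h1, h2, h3, h4⟩ := hq
  rcases h1 with h | h | h <;> subst h <;>
    rcases h2 with h | h | h <;> subst h <;>
    rcases h3 with h | h | h <;> subst h <;>
    rcases h4 with h | h | h <;> subst h <;> decide

lemma pvFoldl_nil (w : List (Char × Char × Char)) : w.foldl pvBStep [] = [] := by
  induction w with
  | nil => rfl
  | cons x rest ih => simpa [pvBStep] using ih

lemma pvMemK4 (f s : Int) (hf : f = 0 ∨ f = 1) (hs : s = 0 ∨ s = 1) : (f, s) ∈ pvK4 := by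
  rcases hf with rfl | rfl <;> rcases hs with rfl | rfl <;> decide

lemma pvQok_look (q : Option Int × Option Int × Option Int × Option Int) (hq : pvQok q)
    (f s : Int) (hf : f = 0 ∨ f = 1) (hs : s = 0 ∨ s = 1) :
    pvLookQ q (f, s) = none ∨ pvLookQ q (f, s) = some 0 ∨ pvLookQ q (f, s) = some 1 := by
  obtain ⟨h1, h2, h3, h4⟩ := hq
  rcases hf with rfl | rfl <;> rcases hs with rfl | rfl <;>
    simp only [pvLookQ] <;> norm_num <;> tauto

lemma pvQok_upd (q : Option Int × Option Int × Option Int × Option Int) (hq : pvQok q)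
    (f s t : Int) (hf : f = 0 ∨ f = 1) (hs : s = 0 ∨ s = 1) (ht : t = 0 ∨ t = 1) :
    pvQok (pvUpd q f s t) := by
  obtain ⟨h1, h2, h3, h4⟩ := hq
  have hst : some t = none ∨ some t = some (0 : Int) ∨ some t = some 1 := by
    rcases ht with rfl | rfl
    · exact Or.inr (Or.inl rfl)
    · exact Or.inr (Or.inr rfl)
  rcases hf with rfl | rfl <;> rcases hs with rfl | rfl
  · rw [show pvUpd q 0 0 t = (some t, q.2.1, q.2.2.1, q.2.2.2) from by norm_num [pvUpd]]
    exact ⟨hst, h2, h3, h4⟩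
  · rw [show pvUpd q 0 1 t = (q.1, some t, q.2.2.1, q.2.2.2) from by norm_num [pvUpd]]
    exact ⟨h1, hst, h3, h4⟩
  · rw [show pvUpd q 1 0 t = (q.1, q.2.1, some t, q.2.2.2) from by norm_num [pvUpd]]
    exact ⟨h1, h2, hst, h4⟩
  · rw [show pvUpd q 1 1 t = (q.1, q.2.1, q.2.2.1, some t) from by norm_num [pvUpd]]
    exact ⟨h1, h2, h3, hst⟩

lemma pvAbs_insert (d : PySem.Dict (Int × Int) Int) (f s t : Int)
    (hf : f = 0 ∨ f = 1) (hs : s = 0 ∨ s = 1) :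
    pvAbs (d.insert (f, s) t) = pvUpd (pvAbs d) f s t := by
  rcases hf with rfl | rfl <;> rcases hs with rfl | rfl <;>
    simp [pvAbs, pvUpd, PySem.Dict.get?_insert]

lemma pvConsQ_at (n : Int) (q : Option Int × Option Int × Option Int × Option Int)
    (f s : Int) (hf : f = 0 ∨ f = 1) (hs : s = 0 ∨ s = 1)
    (hc : pvConsQ n q = true) : pvCq n f s (pvLookQ q (f, s)) = true := by
  simp only [pvConsQ, Bool.and_eq_true] at hc
  rcases hf with rfl | rfl <;> rcases hs with rfl | rfl <;>
    simp only [pvLookQ] <;> norm_num <;> tauto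

-- the conflict case empties the candidate list
lemma pvFilter_conflict (q : Option Int × Option Int × Option Int × Option Int)
    (f s t v : Int) (hf : f = 0 ∨ f = 1) (hs : s = 0 ∨ s = 1)
    (h : pvLookQ q (f, s) = some v) (hne : ¬(v = t)) :
    (pvC q).filter (fun n => pvRuleBit n f s == t) = [] := by
  rw [List.filter_eq_nil_iff]
  intro n hn
  have hc := List.of_mem_filter (by exact hn : n ∈ (PySem.List.pyRange 0 16 1).filter
    (fun n => pvConsQ n q))
  have := pvConsQ_at n q f s hf hs hc
  rw [h] at this
  simp only [pvCq, beq_iff_eq] at this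
  simp [this, hne]

-- the consistent-update case: filtering by the new constraint is updating q
lemma pvFilter_upd (q : Option Int × Option Int × Option Int × Option Int)
    (f s t : Int) (hf : f = 0 ∨ f = 1) (hs : s = 0 ∨ s = 1)
    (h : pvLookQ q (f, s) = none ∨ pvLookQ q (f, s) = some t) :
    (pvC q).filter (fun n => pvRuleBit n f s == t) = pvC (pvUpd q f s t) := by
  rcases h with h | h
  · unfold pvC
    rw [List.filter_filter]
    refine List.filter_congr ?_
    intro n _
    rcases hf with rfl | rfl <;> rcases hs with rfl | rfl <;>
      norm_num [pvLookQ] at h <;>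
      norm_num [pvUpd, pvConsQ, pvCq, h, Bool.and_assoc, Bool.and_comm, Bool.and_left_comm]
  · have hup : pvUpd q f s t = q := by
      rcases hf with rfl | rfl <;> rcases hs with rfl | rfl <;>
        norm_num [pvLookQ] at h <;> norm_num [pvUpd] <;> rw [← h]
    rw [hup, List.filter_eq_self]
    intro n hn
    have hc := List.of_mem_filter (by exact hn : n ∈ (PySem.List.pyRange 0 16 1).filter
      (fun n => pvConsQ n q))
    have hcc := pvConsQ_at n q f s hf hs hc
    rw [h] at hcc
    simpa [pvCq] using hcc

lemma pvWindows3_mem (cs : List Char) (x : Char × Char × Char) (hx : x ∈ pvWindows3 cs) :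
    x.1 ∈ cs ∧ x.2.1 ∈ cs ∧ x.2.2 ∈ cs := by
  induction cs with
  | nil => simp [pvWindows3] at hx
  | cons a rest ih =>
    match rest, hx, ih with
    | b :: c :: r, hx, ih =>
      simp only [pvWindows3, List.mem_cons] at hx
      rcases hx with rfl | hx
      · simp
      · have := ih hx
        simp only [List.mem_cons] at this ⊢
        tauto
    | [], hx, _ => simp [pvWindows3] at hx
    | [b], hx, _ => simp [pvWindows3] at hx

lemma pvIntChar_bin (c : Char) (hc : c = '0' ∨ c = '1') :
    pvIntChar c = 0 ∨ pvIntChar c = 1 := by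
  rcases hc with rfl | rfl
  · left; rfl
  · right; rfl

-- the simulation: A's scan-then-compare equals B's progressive filtering
lemma pvMain (w : List (Char × Char × Char)) (d : PySem.Dict (Int × Int) Int)
    (hb : ∀ x ∈ w, (x.1 = '0' ∨ x.1 = '1') ∧ (x.2.1 = '0' ∨ x.2.1 = '1') ∧
      (x.2.2 = '0' ∨ x.2.2 = '1'))
    (hnd : d.keys.Nodup) (hsub : ∀ k ∈ d.keys, k ∈ pvK4) (hq : pvQok (pvAbs d)) :
    (match pvAScan w d with
      | none => -1
      | some d' => pvAFin d') = pvBFin (w.foldl pvBStep (pvC (pvAbs d))) := by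
  induction w generalizing d with
  | nil =>
    simp only [pvAScan, List.foldl_nil]
    rw [pvAFin_bridge d hnd hsub]
    exact pvQfinal _ hq
  | cons x rest ih =>
    obtain ⟨a, b, c⟩ := x
    obtain ⟨ha, hbc, hcc⟩ := hb _ (List.mem_cons_self ..)
    have hbr : ∀ x ∈ rest, (x.1 = '0' ∨ x.1 = '1') ∧ (x.2.1 = '0' ∨ x.2.1 = '1') ∧
        (x.2.2 = '0' ∨ x.2.2 = '1') := fun x hx => hb x (List.mem_cons_of_mem _ hx)
    have hf := pvIntChar_bin a ha
    have hs := pvIntChar_bin b hbc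
    have ht := pvIntChar_bin c hcc
    set f := pvIntChar a with hfd
    set s := pvIntChar b with hsd
    set t := pvIntChar c with htd
    have hbstep : pvBStep (pvC (pvAbs d)) (a, b, c) =
        (pvC (pvAbs d)).filter (fun n => pvRuleBit n f s == t) := rfl
    have hlook := pvLookQ_abs d (f, s) (pvMemK4 f s hf hs)
    -- the continuation shared by both non-conflict branches
    have hcont : (match pvAScan rest (d.insert (f, s) t) with
        | none => -1
        | some d' => pvAFin d') = pvBFin (rest.foldl pvBStep (pvC (pvUpd (pvAbs d) f s t))) := by
      rw [← pvAbs_insert d f s t hf hs]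
      apply ih _ hbr (PySem.Dict.nodup_keys_insert _ _ _ hnd)
      · intro k hk
        rcases (PySem.Dict.mem_keys_insert _ _ _ _).mp hk with rfl | hk
        · exact pvMemK4 f s hf hs
        · exact hsub k hk
      · rw [pvAbs_insert d f s t hf hs]
        exact pvQok_upd _ hq f s t hf hs ht
    simp only [pvAScan, List.foldl_cons, ← hfd, ← hsd, ← htd, hbstep]
    rw [PySem.Dict.contains_eq_isSome_get?, PySem.Dict.getD_eq_get?_getD]
    rcases pvQok_look _ hq f s hf hs with ho | ho | ho <;> rw [hlook] at ho <;> rw [ho]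
    · -- key absent: no conflict possible
      simp only [Option.isSome_none, Bool.false_and, Bool.false_eq_true, if_false]
      rw [pvFilter_upd _ f s t hf hs (Or.inl (hlook.trans ho))]
      exact hcont
    · -- key present with value 0
      by_cases hvt : (0 : Int) = t
      · simp only [Option.isSome_some, Option.getD_some, Bool.true_and,
          show ((0 : Int) == t) = true from by simp [← hvt], Bool.not_true, Bool.false_eq_true,
          if_false]
        rw [pvFilter_upd _ f s t hf hs (Or.inr (by rw [hlook, ho, hvt]))]
        exact hcont
      · simp only [Option.isSome_some, Option.getD_some, Bool.true_and,
          show ((0 : Int) == t) = false from by simpa using hvt, Bool.not_false, if_true]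
        rw [pvFilter_conflict _ f s t 0 hf hs (hlook.trans ho) hvt, pvFoldl_nil]
        rfl
    · -- key present with value 1
      by_cases hvt : (1 : Int) = t
      · simp only [Option.isSome_some, Option.getD_some, Bool.true_and,
          show ((1 : Int) == t) = true from by simp [← hvt], Bool.not_true, Bool.false_eq_true,
          if_false]
        rw [pvFilter_upd _ f s t hf hs (Or.inr (by rw [hlook, ho, hvt]))]
        exact hcont
      · simp only [Option.isSome_some, Option.getD_some, Bool.true_and,
          show ((1 : Int) == t) = false from by simpa using hvt, Bool.not_false, if_true]
        rw [pvFilter_conflict _ f s t 1 hf hs (hlook.trans ho) hvt, pvFoldl_nil]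
        rfl

-- ===== VERDICT (by name: the statement is the Claim_ definition above) =====
theorem uniquely_produced_by_rule_spec : Claim_equal_uniquely_produced_by_rule := by
  intro line _ hpre
  unfold Spec_uniquely_produced_by_rule uniquely_produced_by_rule uniquely_produced_by_rule_alt
  by_cases hlen : PySem.Str.len line < 6
  · rw [if_pos hlen, if_pos hlen]
  · rw [if_neg hlen, if_neg hlen]
    have hbin : ∀ c ∈ line.toList, c = '0' ∨ c = '1' := by
      rcases hpre with h | h
      · exact absurd h hlen
      · exact h
    have hw : ∀ x ∈ pvWindows3 line.toList, (x.1 = '0' ∨ x.1 = '1') ∧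
        (x.2.1 = '0' ∨ x.2.1 = '1') ∧ (x.2.2 = '0' ∨ x.2.2 = '1') := by
      intro x hx
      obtain ⟨h1, h2, h3⟩ := pvWindows3_mem line.toList x hx
      exact ⟨hbin _ h1, hbin _ h2, hbin _ h3⟩
    have hmain := pvMain (pvWindows3 line.toList) PySem.Dict.empty hw
      (by simp) (by simp) ⟨Or.inl rfl, Or.inl rfl, Or.inl rfl, Or.inl rfl⟩
    rw [show pvC (pvAbs PySem.Dict.empty) = PySem.List.pyRange 0 16 1 from by decide] at hmain
    exact hmain
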